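-- pv_equiv track=rewrite | github.com/rlagusghvv/jebon-cover-generator | cover_generator.py | parse_volume_spec
-- ===== SOURCE A (Python) =====
-- def parse_volume_spec(text: str) -> list[str]:
--     normalized = text.replace("\n", ",").replace("~", "-")
--     tokens = [tok.strip() for tok in normalized.split(",") if tok.strip()]
--     if not tokens:
--         raise ValueError("권 범위가 비어 있습니다. 예: 1-100 또는 1,3,5-8")
--
--     result: list[str] = []
--     seen: set[str] = set()
--
--     for token in tokens:
--         if "-" in token:
--             parts = [p.strip() for p in token.split("-", 1)]
--             if len(parts) != 2 or not parts[0].isdigit() or not parts[1].isdigit():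
--                 raise ValueError(f"권 범위 형식 오류: '{token}'")
--
--             start = int(parts[0])
--             end = int(parts[1])
--             step = 1 if start <= end else -1
--             for num in range(start, end + step, step):
--                 vol = str(num)
--                 if vol not in seen:
--                     seen.add(vol)
--                     result.append(vol)
--         else:
--             vol = str(int(token)) if token.isdigit() else token
--             if vol not in seen:
--                 seen.add(vol)
--                 result.append(vol)
--
--     if not result:
--         raise ValueError("유효한 권 정보가 없습니다.")
--     return result
-- ===== SOURCE B (Python) =====
-- def _expand(tokens: list[str]) -> list[str]:
--     """Recursively expand tokens into the raw stream of volume strings (no dedup)."""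
--     if not tokens:
--         return []
--     token = tokens[0]
--     if "-" in token:
--         parts = [p.strip() for p in token.split("-", 1)]
--         if len(parts) != 2 or not parts[0].isdigit() or not parts[1].isdigit():
--             raise ValueError(f"권 범위 형식 오류: '{token}'")
--         start = int(parts[0])
--         end = int(parts[1])
--         step = 1 if start <= end else -1
--         head = [str(start + i * step) for i in range(abs(end - start) + 1)]
--     else:
--         head = [str(int(token)) if token.isdigit() else token]
--     return head + _expand(tokens[1:])
--
--
-- def _dedup(raw: list[str]) -> list[str]:
--     """Keep the first occurrence of each value: keep the head, drop its later copies."""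
--     if not raw:
--         return []
--     head = raw[0]
--     return [head] + _dedup([v for v in raw[1:] if v != head])
--
--
-- def parse_volume_spec(text: str) -> list[str]:
--     normalized = text.replace("\n", ",").replace("~", "-")
--     tokens = [tok.strip() for tok in normalized.split(",") if tok.strip()]
--     if not tokens:
--         raise ValueError("권 범위가 비어 있습니다. 예: 1-100 또는 1,3,5-8")
--     result = _dedup(_expand(tokens))
--     if not result:
--         raise ValueError("유효한 권 정보가 없습니다.")
--     return result
-- ===== Notes on version B (the rewrite author's own statement) =====
-- stated objective: alternative
-- what changed: A is one iterative loop threading a seen-set and appending guardedly; B is recursive and staged: a structural recursion over the token list expands each token via an index-based comprehension str(start+i*step) for i in range(abs(end-start)+1) (instead of range(start,end+step,step)) and concatenates, then a second recursion deduplicates by keeping each head and filtering its later copies out of the tail.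
import Mathlib
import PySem

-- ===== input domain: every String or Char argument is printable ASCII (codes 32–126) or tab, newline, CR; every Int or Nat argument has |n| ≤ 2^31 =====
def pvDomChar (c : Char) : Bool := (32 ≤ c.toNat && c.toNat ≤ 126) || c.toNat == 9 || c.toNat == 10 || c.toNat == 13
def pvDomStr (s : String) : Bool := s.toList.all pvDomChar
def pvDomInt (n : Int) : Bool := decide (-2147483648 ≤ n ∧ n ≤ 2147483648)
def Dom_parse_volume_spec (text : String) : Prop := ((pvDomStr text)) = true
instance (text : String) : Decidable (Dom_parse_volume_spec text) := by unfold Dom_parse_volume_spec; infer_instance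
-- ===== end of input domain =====

-- B replaces A's single seen-set loop by two structural recursions (index-based range expansion
-- per token, then head-keep/tail-filter dedup); objective: alternative. Return-value equivalence only.

-- shared by both ports (identical normalization lines in both Pythons)
def pvTokens (text : String) : List String :=
  (((PySem.Str.split? (PySem.Str.replace (PySem.Str.replace text "\n" ",") "~" "-") ",").getD []).map
      PySem.Str.strip).filter (fun t => t ≠ "")

-- ===== PORT A =====
-- result.append with the seen-set guard
def pvAddVol (st : List String × PySem.Set String) (vol : String) :
    List String × PySem.Set String :=
  if PySem.Set.contains st.2 vol then st else (st.1 ++ [vol], PySem.Set.add st.2 vol)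

-- one iteration of A's 'for token in tokens' loop; none = ValueError
def pvATok (st : List String × PySem.Set String) (token : String) :
    Option (List String × PySem.Set String) :=
  if PySem.Str.isIn "-" token then
    let parts := ((PySem.Str.splitMax? token "-" 1).getD []).map PySem.Str.strip
    if parts.length ≠ 2 ∨ PySem.Str.strIsdigit (parts.getD 0 "") = false ∨
        PySem.Str.strIsdigit (parts.getD 1 "") = false then none
    else
      let start := (PySem.Int.ofStr? (parts.getD 0 "")).getD 0
      let stop := (PySem.Int.ofStr? (parts.getD 1 "")).getD 0
      let step : Int := if start ≤ stop then 1 else -1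
      some ((PySem.List.pyRange start (stop + step) step).foldl
        (fun st num => pvAddVol st (PySem.Int.toStr num)) st)
  else
    let vol := if PySem.Str.strIsdigit token then PySem.Int.toStr ((PySem.Int.ofStr? token).getD 0)
               else token
    some (pvAddVol st vol)

def parse_volume_spec (text : String) : List String :=
  let tokens := pvTokens text
  if tokens = [] then []  -- ValueError in the Python
  else
    match tokens.foldl (fun acc tok => acc.bind (fun st => pvATok st tok))
        (some ([], PySem.Set.empty)) with
    | none => []  -- ValueError in the Python
    | some (result, _) => if result = [] then [] else result

-- ===== PORT B =====
-- B's _expand head for one token; none = ValueError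
def pvBExpandTok (token : String) : Option (List String) :=
  if PySem.Str.isIn "-" token then
    let parts := ((PySem.Str.splitMax? token "-" 1).getD []).map PySem.Str.strip
    if parts.length ≠ 2 ∨ PySem.Str.strIsdigit (parts.getD 0 "") = false ∨
        PySem.Str.strIsdigit (parts.getD 1 "") = false then none
    else
      let start := (PySem.Int.ofStr? (parts.getD 0 "")).getD 0
      let stop := (PySem.Int.ofStr? (parts.getD 1 "")).getD 0
      let step : Int := if start ≤ stop then 1 else -1
      some ((PySem.List.pyRange 0 (((stop - start).natAbs : Int) + 1) 1).map
        (fun i => PySem.Int.toStr (start + i * step)))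
  else
    some [if PySem.Str.strIsdigit token then PySem.Int.toStr ((PySem.Int.ofStr? token).getD 0)
          else token]

-- B's _expand: structural recursion over the token list
def pvBExpand : List String → Option (List String)
  | [] => some []
  | token :: rest =>
    match pvBExpandTok token with
    | none => none
    | some head => (pvBExpand rest).map (fun tail => head ++ tail)

-- B's _dedup: keep the head, filter its later copies out of the tail, recurse
def pvBDedup : List String → List String
  | [] => []
  | v :: rest => v :: pvBDedup (rest.filter (fun x => x ≠ v))
termination_by raw => raw.length
decreasing_by simp; exact le_trans (List.length_filter_le _ _) (le_of_eq List.length_attach)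

def parse_volume_spec_alt (text : String) : List String :=
  let tokens := pvTokens text
  if tokens = [] then []  -- ValueError in the Python
  else
    match pvBExpand tokens with
    | none => []  -- ValueError in the Python
    | some raw =>
      let result := pvBDedup raw
      if result = [] then [] else result

-- ===== PRECONDITION & SPEC =====
-- validity of one token: if it contains '-', both stripped halves must be digit strings
def pvTokOk (tok : String) : Bool :=
  !PySem.Str.isIn "-" tok ||
    (let parts := ((PySem.Str.splitMax? tok "-" 1).getD []).map PySem.Str.strip
     parts.length == 2 && PySem.Str.strIsdigit (parts.getD 0 "") &&
       PySem.Str.strIsdigit (parts.getD 1 ""))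

-- Pre_ = exactly the inputs on which the Python A returns (no ValueError): at least one
-- nonempty token, and every range-shaped token well-formed.
def Pre_parse_volume_spec (text : String) : Prop :=
  pvTokens text ≠ [] ∧ (pvTokens text).all pvTokOk = true
instance (text : String) : Decidable (Pre_parse_volume_spec text) := by
  unfold Pre_parse_volume_spec; infer_instance

def pvWitness_parse_volume_spec : String := "1-3, 2, abc"

def Spec_parse_volume_spec (text : String) (out : List String) : Prop :=
  out = parse_volume_spec_alt text
instance (text : String) (out : List String) : Decidable (Spec_parse_volume_spec text out) := by
  unfold Spec_parse_volume_spec; infer_instance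

-- ===== CLAIM (what is proved, stated in full; the proofs are below) =====
def Claim_equal_parse_volume_spec : Prop := ∀ (text : String), Dom_parse_volume_spec text →
  Pre_parse_volume_spec text → Spec_parse_volume_spec text (parse_volume_spec text)

-- ===== LEMMAS AND PROOFS =====

-- A's state stays diagonal: result and seen hold the same list, and one guarded append IS Set.add
theorem pvAddVol_diag (s : PySem.Set String) (v : String) :
    pvAddVol (s, s) v = (PySem.Set.add s v, PySem.Set.add s v) := by
  by_cases h : v ∈ s <;> simp [pvAddVol, PySem.Set.add, h]

theorem foldl_pvAddVol_diag (f : Int → String) (l : List Int) (s : PySem.Set String) :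
    l.foldl (fun st n => pvAddVol st (f n)) (s, s) =
      (l.foldl (fun t n => PySem.Set.add t (f n)) s,
       l.foldl (fun t n => PySem.Set.add t (f n)) s) := by
  induction l generalizing s with
  | nil => rfl
  | cons n rest ih =>
    simp only [List.foldl_cons, pvAddVol_diag]
    exact ih _

-- A's range list equals B's index-based comprehension (ascending case)
theorem pyRangeMap_le (start stop : Int) (h : start ≤ stop) :
    (PySem.List.pyRange start (stop + 1) 1).map PySem.Int.toStr =
      (PySem.List.pyRange 0 (((stop - start).natAbs : Int) + 1) 1).map
        (fun i => PySem.Int.toStr (start + i * 1)) := by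
  rw [PySem.List.pyRange_one, PySem.List.pyRange_one]
  have hn : (stop + 1 - start).toNat = ((((stop - start).natAbs : Int) + 1) - 0).toNat := by omega
  rw [hn]
  simp only [List.map_map]
  apply List.map_congr_left
  intro k _
  simp only [Function.comp]
  congr 1
  push_cast
  ring

-- A's range list equals B's index-based comprehension (descending case)
theorem pyRangeMap_gt (start stop : Int) (h : ¬ start ≤ stop) :
    (PySem.List.pyRange start (stop + -1) (-1)).map PySem.Int.toStr =
      (PySem.List.pyRange 0 (((stop - start).natAbs : Int) + 1) 1).map
        (fun i => PySem.Int.toStr (start + i * -1)) := by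
  rw [PySem.List.pyRange_neg_one, PySem.List.pyRange_one]
  have hn : (start - (stop + -1)).toNat = ((((stop - start).natAbs : Int) + 1) - 0).toNat := by omega
  rw [hn]
  simp only [List.map_map]
  apply List.map_congr_left
  intro k _
  simp only [Function.comp]
  congr 1
  push_cast
  ring

-- one token: A's step on the diagonal deduped state appends B's head expansion, re-deduped
theorem pvATok_eq (raw : List String) (tok : String) :
    pvATok (PySem.Set.ofList raw, PySem.Set.ofList raw) tok =
      (pvBExpandTok tok).map (fun h => (PySem.Set.ofList (raw ++ h), PySem.Set.ofList (raw ++ h))) := by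
  unfold pvATok pvBExpandTok
  dsimp only
  split_ifs with h1 h2 h3
  · rfl
  · rw [foldl_pvAddVol_diag, ← List.foldl_map, pyRangeMap_le _ _ h3]
    simp [PySem.Set.ofList_eq_foldl, List.foldl_append, List.foldl_map]
  · rw [foldl_pvAddVol_diag, ← List.foldl_map, pyRangeMap_gt _ _ h3]
    simp [PySem.Set.ofList_eq_foldl, List.foldl_append, List.foldl_map]
  all_goals simp [pvAddVol_diag, PySem.Set.ofList_eq_foldl, List.foldl_append]

-- the whole loop: A's fold from the diagonal state is B's expansion, appended and deduped
theorem foldl_tok_eq (ts : List String) (raw : List String) :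
    ts.foldl (fun acc tok => acc.bind (fun st => pvATok st tok))
        (some (PySem.Set.ofList raw, PySem.Set.ofList raw)) =
      (pvBExpand ts).map
        (fun e => (PySem.Set.ofList (raw ++ e), PySem.Set.ofList (raw ++ e))) := by
  induction ts generalizing raw with
  | nil => simp [pvBExpand]
  | cons t rest ih =>
    simp only [List.foldl_cons, Option.bind_some, pvATok_eq raw t, pvBExpand]
    cases h : pvBExpandTok t with
    | none =>
      simp only [Option.map_none]
      clear ih h
      induction rest with
      | nil => rfl
      | cons u us ihu => simpa using ihu
    | some hd =>
      simp only [Option.map_some]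
      rw [ih (raw ++ hd)]
      cases hb : pvBExpand rest with
      | none => rfl
      | some tail => simp [List.append_assoc]

-- folding Set.add over elements already excluded by a filter is invariant
theorem foldl_add_filter {α : Type} [DecidableEq α] (xs : List α) (s : PySem.Set α) (x : α)
    (hx : x ∈ s) : xs.foldl PySem.Set.add s = (xs.filter (fun a => a ≠ x)).foldl PySem.Set.add s := by
  induction xs generalizing s with
  | nil => rfl
  | cons a rest ih =>
    by_cases hax : a = x
    · subst hax
      have : PySem.Set.add s a = s := by simp [PySem.Set.add, hx]
      simp only [List.foldl_cons, this, List.filter_cons]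
      rw [if_neg (by simp)]
      exact ih s hx
    · simp only [List.foldl_cons, List.filter_cons]
      rw [if_pos (by simp [hax])]
      simp only [List.foldl_cons]
      exact ih (PySem.Set.add s a) (by simp [PySem.Set.mem_add, hx])

-- if no element equals x, folding Set.add over x :: s keeps x in front
theorem foldl_add_cons {α : Type} [DecidableEq α] (xs : List α) (s : List α) (x : α)
    (hne : ∀ a ∈ xs, a ≠ x) :
    xs.foldl PySem.Set.add (x :: s) = x :: xs.foldl PySem.Set.add s := by
  induction xs generalizing s with
  | nil => rfl
  | cons a rest ih =>
    have hax : a ≠ x := hne a (by simp)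
    have : PySem.Set.add (x :: s) a = x :: PySem.Set.add s a := by
      simp [PySem.Set.add, PySem.Set.contains, hax]
      split_ifs <;> rfl
    simp only [List.foldl_cons, this]
    exact ih _ (fun a ha => hne a (by simp [ha]))

-- ordered first-occurrence dedup satisfies B's head-keep/tail-filter recursion
theorem ofList_cons_filter (x : String) (xs : List String) :
    PySem.Set.ofList (x :: xs) = x :: PySem.Set.ofList (xs.filter (fun a => a ≠ x)) := by
  rw [PySem.Set.ofList_eq_foldl, PySem.Set.ofList_eq_foldl]
  simp only [List.foldl_cons]
  have h0 : PySem.Set.add ([] : PySem.Set String) x = [x] := by rfl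
  rw [h0]
  rw [foldl_add_filter xs [x] x (by simp)]
  exact foldl_add_cons _ _ _ (fun a ha => by
    have := List.of_mem_filter ha
    simpa using this)

-- B's recursive dedup computes ordered first-occurrence dedup
theorem pvBDedup_eq_ofList (raw : List String) : pvBDedup raw = PySem.Set.ofList raw := by
  induction hn : raw.length using Nat.strong_induction_on generalizing raw with
  | _ n ih =>
    cases raw with
    | nil => rw [pvBDedup]; rfl
    | cons v rest =>
      rw [pvBDedup, ofList_cons_filter]
      congr 1
      exact ih (rest.filter (fun x => x ≠ v)).length
        (by have hf := List.length_filter_le (fun x => decide (x ≠ v)) rest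
            simp only [List.length_cons] at hn
            omega) _ rfl

-- ===== VERDICT (by name: the statement is the Claim_ definition above) =====
set_option maxHeartbeats 1000000 in
theorem parse_volume_spec_spec : Claim_equal_parse_volume_spec := by
  unfold Claim_equal_parse_volume_spec
  intro text _ _
  unfold Spec_parse_volume_spec parse_volume_spec parse_volume_spec_alt
  dsimp only
  by_cases ht : pvTokens text = []
  · rw [if_pos ht, if_pos ht]
  · rw [if_neg ht, if_neg ht]
    have h : (pvTokens text).foldl (fun acc tok => acc.bind (fun st => pvATok st tok))
          (some (([] : List String), PySem.Set.empty)) =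
        (pvBExpand (pvTokens text)).map
          (fun e => (PySem.Set.ofList ([] ++ e), PySem.Set.ofList ([] ++ e))) := by
      have h0 : (PySem.Set.empty : PySem.Set String) = PySem.Set.ofList [] := rfl
      have h1 : (([] : List String), (PySem.Set.empty : PySem.Set String)) =
          (PySem.Set.ofList [], PySem.Set.ofList []) := rfl
      rw [h1]
      exact foldl_tok_eq (pvTokens text) []
    rw [h]
    cases hb : pvBExpand (pvTokens text) with
    | none => rfl
    | some raw => simp [pvBDedup_eq_ofList]
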